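-- pv_equiv track=rewrite | github.com/aflynt/aoc | y23_day04/p1.py | get_cardval
-- ===== SOURCE A (Python) =====
-- def get_cardval(w, p):
--
--     nmatch = 0
--     cardval = 0
--     for val in p:
--         if val in w:
--             nmatch += 1
--             if nmatch == 1:
--                 cardval = 1
--             else:
--                 cardval *= 2
--     return nmatch, cardval
-- ===== SOURCE B (Python) =====
-- def get_cardval(w, p):
--     nmatch = sum(1 for val in p if val in w)
--     cardval = 0 if nmatch == 0 else 2 ** (nmatch - 1)
--     return nmatch, cardval
-- ===== Notes on version B (the rewrite author's own statement) =====
-- stated objective: simpler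
-- what changed: Replaces the stateful loop that doubles an accumulator with a one-pass match count and a closed-form power of two (0 if no matches else 2**(nmatch-1)).
import Mathlib
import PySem

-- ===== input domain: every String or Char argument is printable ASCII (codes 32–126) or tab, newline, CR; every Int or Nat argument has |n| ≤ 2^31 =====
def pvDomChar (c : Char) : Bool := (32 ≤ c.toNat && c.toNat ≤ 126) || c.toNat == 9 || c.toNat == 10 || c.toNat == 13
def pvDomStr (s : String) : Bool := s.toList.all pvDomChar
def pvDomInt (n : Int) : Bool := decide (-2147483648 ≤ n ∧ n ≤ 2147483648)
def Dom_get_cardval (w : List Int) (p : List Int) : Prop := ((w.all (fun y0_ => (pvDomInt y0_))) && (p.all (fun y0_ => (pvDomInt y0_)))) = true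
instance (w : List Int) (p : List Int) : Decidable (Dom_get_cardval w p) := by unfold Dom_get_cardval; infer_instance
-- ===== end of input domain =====

-- B replaces A's stateful doubling loop with a one-pass match count and the closed form 0 / 2^(nmatch-1) (objective: simpler).


-- ===== PORT A =====
def get_cardval (w : List Int) (p : List Int) : Int × Int :=
  p.foldl (fun s val =>
    if w.contains val then
      let nmatch := s.1 + 1
      if nmatch = 1 then (nmatch, 1) else (nmatch, s.2 * 2)
    else s) (0, 0)

-- ===== PORT B =====
def get_cardval_alt (w : List Int) (p : List Int) : Int × Int :=
  let nmatch : Int := ((p.filter (fun v => w.contains v)).length : Int)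
  (nmatch, if nmatch = 0 then 0 else 2 ^ (nmatch - 1).toNat)

-- ===== PRECONDITION & SPEC =====
def Spec_get_cardval (w : List Int) (p : List Int) (out : Int × Int) : Prop := out = get_cardval_alt w p
instance (w : List Int) (p : List Int) (out : Int × Int) : Decidable (Spec_get_cardval w p out) := by unfold Spec_get_cardval; infer_instance

-- ===== CLAIM (what is proved, stated in full; the proofs are below) =====
def Claim_equal_get_cardval : Prop := ∀ (w : List Int) (p : List Int), Dom_get_cardval w p → Spec_get_cardval w p (get_cardval w p)

-- ===== LEMMAS AND PROOFS =====

-- ===== VERDICT (by name: the statement is the Claim_ definition above) =====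

-- value of the accumulator after n matches
def pvVal (n : Nat) : Int := if n = 0 then 0 else 2 ^ (n - 1)

theorem pvFold_inv (w p : List Int) (n : Nat) :
    p.foldl (fun s val =>
      if w.contains val then
        let nmatch := s.1 + 1
        if nmatch = 1 then (nmatch, 1) else (nmatch, s.2 * 2)
      else s) ((n : Int), pvVal n)
    = (((n + (p.filter (fun v => w.contains v)).length : Nat) : Int),
       pvVal (n + (p.filter (fun v => w.contains v)).length)) := by
  induction p generalizing n with
  | nil => simp
  | cons a t ih =>
    by_cases h : w.contains a = true
    · simp only [List.foldl_cons, List.filter_cons, h, if_pos]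
      have h1 : ((n : Int) + 1 = 1) ↔ (n = 0) := by omega
      by_cases hn : n = 0
      · subst hn
        simpa [pvVal, Nat.add_comm] using ih 1
      · have hne : ¬ ((n : Int) + 1 = 1) := by omega
        have hv : pvVal n * 2 = pvVal (n + 1) := by
          simp only [pvVal, Nat.add_sub_cancel]
          rw [if_neg hn, if_neg (Nat.succ_ne_zero n), ← pow_succ]
          congr 1
          omega
        simp only [hne, if_neg, not_false_iff]
        have hcast : (n : Int) + 1 = ((n + 1 : Nat) : Int) := by push_cast; ring
        rw [hcast, hv, ih (n + 1), List.length_cons,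
          show n + 1 + (List.filter (fun v => w.contains v) t).length
             = n + ((List.filter (fun v => w.contains v) t).length + 1) by omega]
    · simp only [List.foldl_cons, List.filter_cons, h, if_neg, Bool.false_eq_true,
        not_false_iff]
      exact ih n

theorem get_cardval_spec : Claim_equal_get_cardval := by
  intro w p _
  unfold Spec_get_cardval get_cardval get_cardval_alt
  have key := pvFold_inv w p 0
  simp only [Nat.zero_add] at key
  show List.foldl
      (fun s val => if w.contains val = true then
        if s.1 + 1 = 1 then (s.1 + 1, 1) else (s.1 + 1, s.2 * 2) else s)
      (0, 0) p
    = (((p.filter (fun v => w.contains v)).length : Int),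
       if ((p.filter (fun v => w.contains v)).length : Int) = 0 then 0
       else 2 ^ ((((p.filter (fun v => w.contains v)).length : Int)) - 1).toNat)
  have h0 : (Prod.mk (0:Int) (0:Int)) = ((((0:Nat)):Int), pvVal 0) := by simp [pvVal]
  rw [h0, key]
  simp only [pvVal]
  by_cases h : (p.filter (fun v => w.contains v)).length = 0
  · simp
  · have hne : ¬ (((p.filter (fun v => w.contains v)).length : Int) = 0) := by omega
    simp only [h, hne, if_neg, not_false_iff]
    congr 2
    omega
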